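-- pv_equiv track=rewrite | github.com/ksj15242/Algorithm | 프로그래머스/1/92334. 신고 결과 받기/신고 결과 받기.py | solution
-- ===== SOURCE A (Python) =====
-- def solution(id_list, report, k):
--     n = len(id_list)
--     receivedReportInfo = {name:[] for name in id_list}
--
--     for reportInfo in set(report):
--         sender, receiver = reportInfo.split(" ")
--         receivedReportInfo[receiver].append(sender)
--
--     sendEmailInfo = {name:0 for name in id_list}
--     for receiver, senders in receivedReportInfo.items():
--         reportCount = len(senders)
--
--         if reportCount>=k:
--             for sender in senders:
--                 sendEmailInfo[sender] += 1
--
--     answer = []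
--     for count in sendEmailInfo.values():
--         answer.append(count)
--
--     return answer
-- ===== SOURCE B (Python) =====
-- def solution(id_list, report, k):
--     pairs = set(report)
--
--     cnt = {name: 0 for name in id_list}
--     for p in pairs:
--         s, r = p.split(" ")
--         cnt[r] += 1
--
--     banned = {r for r in id_list if cnt[r] >= k}
--
--     mail = {name: 0 for name in id_list}
--     for p in pairs:
--         s, r = p.split(" ")
--         if r in banned:
--             mail[s] += 1
--
--     return list(mail.values())
-- ===== Notes on version B (the rewrite author's own statement) =====
-- stated objective: alternative
-- what changed: Instead of grouping a list of senders per receiver and walking the grouped dict, B keeps only an integer report counter per receiver, derives the banned set, and rescans the deduplicated reports attributing one mail per (sender, banned receiver) pair.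
import Mathlib
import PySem

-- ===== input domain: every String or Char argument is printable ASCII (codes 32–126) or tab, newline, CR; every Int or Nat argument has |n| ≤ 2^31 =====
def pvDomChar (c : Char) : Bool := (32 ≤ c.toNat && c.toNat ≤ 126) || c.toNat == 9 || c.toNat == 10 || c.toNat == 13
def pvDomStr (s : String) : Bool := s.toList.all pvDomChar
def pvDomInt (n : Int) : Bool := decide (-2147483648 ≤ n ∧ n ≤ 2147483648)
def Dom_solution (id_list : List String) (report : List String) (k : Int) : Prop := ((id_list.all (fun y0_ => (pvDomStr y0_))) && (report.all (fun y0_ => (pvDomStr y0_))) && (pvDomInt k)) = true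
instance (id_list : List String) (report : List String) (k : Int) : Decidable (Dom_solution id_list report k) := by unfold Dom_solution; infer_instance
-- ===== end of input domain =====

-- B replaces A's per-receiver sender lists with an integer counter, a banned set
-- and a second scan of the deduplicated reports (alternative decomposition, same cost).

-- ===== PORT A =====
def solution (id_list : List String) (report : List String) (k : Int) : List Int :=
  let _n := id_list.length
  let receivedReportInfo : PySem.Dict String (List String) :=
    id_list.foldl (fun d name => d.insert name []) PySem.Dict.empty
  let receivedReportInfo :=
    (PySem.Set.ofList report).foldl (fun d reportInfo =>
      match PySem.Str.split? reportInfo " " with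
      | some [sender, receiver] => d.modify receiver [] (fun l => l ++ [sender])
      | _ => d) receivedReportInfo
  let sendEmailInfo : PySem.Dict String Int :=
    id_list.foldl (fun d name => d.insert name 0) PySem.Dict.empty
  let sendEmailInfo :=
    receivedReportInfo.items.foldl (fun d p =>
      let reportCount : Int := p.2.length
      if reportCount ≥ k then
        p.2.foldl (fun d sender => d.modify sender 0 (· + 1)) d
      else d) sendEmailInfo
  sendEmailInfo.values

-- ===== PORT B =====
def solution_alt (id_list : List String) (report : List String) (k : Int) : List Int :=
  let pairs : PySem.Set String := PySem.Set.ofList report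
  let cnt : PySem.Dict String Int :=
    id_list.foldl (fun d name => d.insert name 0) PySem.Dict.empty
  let cnt :=
    pairs.foldl (fun d p =>
      -- 's, r = p.split(" ")': inside Pre_ the split has exactly two parts
      let parts := (PySem.Str.split? p " ").getD []
      d.modify (parts.getD 1 "") 0 (· + 1)) cnt
  let banned : PySem.Set String :=
    PySem.Set.ofList (id_list.filter (fun r => decide (cnt.getD r 0 ≥ k)))
  let mail : PySem.Dict String Int :=
    id_list.foldl (fun d name => d.insert name 0) PySem.Dict.empty
  let mail :=
    pairs.foldl (fun d p =>
      let parts := (PySem.Str.split? p " ").getD []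
      let s := parts.getD 0 ""
      let r := parts.getD 1 ""
      if banned.contains r then d.modify s 0 (· + 1) else d) mail
  mail.values

-- ===== PRECONDITION & SPEC =====
-- Input-shape helpers used by Pre_ (properties of the input only; no port code).
def partsOf (r : String) : List String := (PySem.Str.split? r " ").getD []
def sendOf (r : String) : String := (partsOf r).getD 0 ""
def recvOf (r : String) : String := (partsOf r).getD 1 ""
-- distinct reports naming c as receiver, mapped to their senders
def sendersL (P : List String) (c : String) : List String :=
  (P.filter (fun ri => recvOf ri == c)).map sendOf
-- Pre_ excludes exactly the inputs where A raises (and B raises at the same place):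
-- a report that does not split on a single space into two parts (ValueError), an
-- unknown receiver (KeyError), and an unknown sender whose receiver gathers at
-- least k distinct reports (KeyError when attributing the mail).
def Pre_solution (id_list : List String) (report : List String) (k : Int) : Prop :=
  ∀ r ∈ report, (partsOf r).length = 2 ∧ recvOf r ∈ id_list ∧
    (((sendersL (PySem.Set.ofList report) (recvOf r)).length : Int) ≥ k → sendOf r ∈ id_list)
instance (id_list : List String) (report : List String) (k : Int) : Decidable (Pre_solution id_list report k) := by unfold Pre_solution; infer_instance

def pvWitness_solution : List String × List String × Int :=
  (["muzi", "frodo", "apeach", "neo"],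
   ["muzi frodo", "apeach frodo", "frodo neo", "muzi neo", "apeach muzi"], 2)

def Spec_solution (id_list : List String) (report : List String) (k : Int) (out : List Int) : Prop := out = solution_alt id_list report k
instance (id_list : List String) (report : List String) (k : Int) (out : List Int) : Decidable (Spec_solution id_list report k out) := by unfold Spec_solution; infer_instance

-- ===== CLAIM (what is proved, stated in full; the proofs are below) =====
def Claim_equal_solution : Prop := ∀ (id_list : List String) (report : List String) (k : Int), Dom_solution id_list report k → Pre_solution id_list report k → Spec_solution id_list report k (solution id_list report k)

-- ===== LEMMAS AND PROOFS =====

def bannedL (id_list report : List String) (k : Int) : List String :=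
  (PySem.Set.ofList id_list).filter
    (fun c => decide (((sendersL (PySem.Set.ofList report) c).length : Int) ≥ k))
def canon (id_list report : List String) (k : Int) : List Int :=
  (PySem.Set.ofList id_list).map
    (fun s => ((PySem.Set.ofList report).countP
      (fun ri => (sendOf ri == s) && decide (recvOf ri ∈ bannedL id_list report k)) : Int))

lemma split_eq {r : String} (h : (partsOf r).length = 2) :
    PySem.Str.split? r " " = some [sendOf r, recvOf r] := by
  unfold sendOf recvOf
  cases hs : PySem.Str.split? r " " with
  | none => simp [partsOf, hs] at h
  | some l =>
    simp only [partsOf, hs, Option.getD_some] at h ⊢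
    match l, h with
    | [a, b], _ => rfl

lemma getD_foldl_insert_const {ν : Type} (l : List String) (c : ν) (d : PySem.Dict String ν)
    (x : String) (dflt : ν) :
    (l.foldl (fun d n => d.insert n c) d).getD x dflt = if x ∈ l then c else d.getD x dflt := by
  induction l generalizing d with
  | nil => simp
  | cons a t ih =>
    simp only [List.foldl_cons, ih, PySem.Dict.getD_insert, List.mem_cons]
    by_cases hx : x ∈ t <;> by_cases hxa : x = a <;> simp [hx, hxa]

lemma keys_init {ν : Type} (l : List String) (c : ν) :
    (l.foldl (fun d n => d.insert n c) PySem.Dict.empty).keys = PySem.Set.ofList l := by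
  rw [PySem.Dict.keys_foldl_insert (f := fun _ _ => c)]
  simp [PySem.Set.update, PySem.Set.ofList_eq_foldl, PySem.Dict.keys_empty]

lemma set_update_of_forall_mem {α : Type} [BEq α] [LawfulBEq α] (s : PySem.Set α) (xs : List α)
    (h : ∀ x ∈ xs, x ∈ s) : PySem.Set.update s xs = s := by
  induction xs generalizing s with
  | nil => rfl
  | cons a t ih =>
    have : PySem.Set.add s a = s := by
      simp [PySem.Set.add, PySem.Set.contains, h a (by simp)]
    simp only [PySem.Set.update, List.foldl_cons] at *
    rw [this, ih s (fun x hx => h x (by simp [hx]))]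

lemma sum_indicator {T : List String} (hT : T.Nodup) (x : String) :
    (T.map (fun c => if x = c then 1 else 0)).sum = if x ∈ T then 1 else 0 := by
  induction T with
  | nil => simp
  | cons a t ih =>
    simp only [List.nodup_cons] at hT
    simp only [List.map_cons, List.sum_cons, ih hT.2, List.mem_cons]
    by_cases hxa : x = a
    · subst hxa; simp [hT.1]
    · simp [hxa]

lemma getD_modifyfold_append (l : List String) (d : PySem.Dict String (List String)) (c : String) :
    (l.foldl (fun d ri => d.modify (recvOf ri) [] (fun t => t ++ [sendOf ri])) d).getD c []
      = d.getD c [] ++ sendersL l c := by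
  have h := PySem.Dict.getD_foldl_modify_append (l.map (fun ri => (recvOf ri, sendOf ri))) d c
  rw [List.foldl_map] at h
  simpa [sendersL, List.filter_map, Function.comp] using h
lemma getD_bumpfold (l : List String) (keyf : String → String) (d : PySem.Dict String Int) (v : String) :
    (l.foldl (fun d ri => d.modify (keyf ri) 0 (· + 1)) d).getD v 0
      = d.getD v 0 + ((l.map keyf).count v : Int) := by
  have h := PySem.Dict.getD_foldl_modify_add_one (l.map keyf) d v
  rw [List.foldl_map] at h
  exact h
lemma foldl_foldl_flatMap {α : Type} (T : List String) (g : String → List String)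
    (f : α → String → α) (init : α) :
    T.foldl (fun d c => (g c).foldl f d) init = (T.flatMap g).foldl f init := by
  rw [List.flatMap_def, List.foldl_flatten, List.foldl_map]
lemma count_eq_countP' {l : List String} {s : String} (f : String → String) :
    (l.map f).count s = l.countP (fun ri => f ri == s) := by
  simp only [List.count, List.countP_map]; rfl

lemma sum_countP (l T : List String) (hT : T.Nodup) (s : String) :
    (T.map (fun c => l.countP (fun ri => (sendOf ri == s) && (recvOf ri == c)))).sum
      = l.countP (fun ri => (sendOf ri == s) && decide (recvOf ri ∈ T)) := by
  induction l with
  | nil => simp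
  | cons a t ih =>
    simp only [List.countP_cons, ← ih]
    by_cases hs : sendOf a == s
    · have h2 : (T.map (fun c => if (sendOf a == s) && (recvOf a == c) then 1 else 0)).sum
          = if recvOf a ∈ T then 1 else 0 := by
        rw [← sum_indicator hT (recvOf a)]
        congr 1
        apply List.map_congr_left
        intro c _
        simp [hs, beq_iff_eq]
      rw [List.sum_map_add, h2, hs]
      simp
    · simp only [Bool.not_eq_true] at hs
      simp [hs]

lemma pre_facts (id_list report : List String) (k : Int)
    (hpre : Pre_solution id_list report k) :
    ∀ ri ∈ PySem.Set.ofList report,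
      PySem.Str.split? ri " " = some [sendOf ri, recvOf ri] ∧
      recvOf ri ∈ id_list ∧
      (((sendersL (PySem.Set.ofList report) (recvOf ri)).length : Int) ≥ k → sendOf ri ∈ id_list) := by
  intro ri hri
  have h := hpre ri ((PySem.Set.mem_ofList report ri).mp hri)
  exact ⟨split_eq h.1, h.2.1, h.2.2⟩

lemma A_char (id_list report : List String) (k : Int)
    (hpre : Pre_solution id_list report k) :
    solution id_list report k = canon id_list report k := by
  have hf := pre_facts id_list report k hpre
  unfold solution
  simp only []
  rw [PySem.List.foldl_congr_mem (PySem.Set.ofList report) _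
    (fun d ri => d.modify (recvOf ri) [] (fun t => t ++ [sendOf ri])) _
    (by intro acc ri hri; rw [(hf ri hri).1])]
  have hkeys1 : (List.foldl (fun d ri => d.modify (recvOf ri) [] fun t => t ++ [sendOf ri])
      (List.foldl (fun d name => d.insert name ([] : List String)) PySem.Dict.empty id_list)
      (PySem.Set.ofList report)).keys = PySem.Set.ofList id_list := by
    rw [PySem.Dict.keys_foldl_modify_key (key := recvOf) (f := fun _ ri => fun t => t ++ [sendOf ri]),
      keys_init]
    apply set_update_of_forall_mem
    intro x hx
    obtain ⟨ri, hri, rfl⟩ := List.mem_map.mp hx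
    exact (PySem.Set.mem_ofList id_list _).mpr (hf ri hri).2.1
  have hgetD1 : ∀ c, (List.foldl (fun d ri => d.modify (recvOf ri) [] fun t => t ++ [sendOf ri])
      (List.foldl (fun d name => d.insert name ([] : List String)) PySem.Dict.empty id_list)
      (PySem.Set.ofList report)).getD c [] = sendersL (PySem.Set.ofList report) c := by
    intro c
    rw [getD_modifyfold_append, getD_foldl_insert_const]
    split_ifs <;> simp [PySem.Dict.getD_empty]
  have hitems : (List.foldl (fun d ri => d.modify (recvOf ri) [] fun t => t ++ [sendOf ri])
      (List.foldl (fun d name => d.insert name ([] : List String)) PySem.Dict.empty id_list)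
      (PySem.Set.ofList report)).items
      = (PySem.Set.ofList id_list).map (fun c => (c, sendersL (PySem.Set.ofList report) c)) := by
    rw [PySem.Dict.items_eq_map_keys _ (by rw [hkeys1]; exact PySem.Set.nodup_ofList id_list)
      ([] : List String), hkeys1]
    exact List.map_congr_left (fun c hc => by rw [hgetD1])
  rw [hitems, List.foldl_map]
  simp only []
  rw [PySem.List.foldl_ite_eq_foldl_filter
    (p := fun c => ((sendersL (PySem.Set.ofList report) c).length : Int) ≥ k)]
  rw [foldl_foldl_flatMap]
  have hnb : (bannedL id_list report k).Nodup :=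
    List.Nodup.filter _ (PySem.Set.nodup_ofList id_list)
  have hkeys2 : (List.foldl (fun d sender => d.modify sender 0 fun x => x + 1)
      (List.foldl (fun d name => d.insert name (0 : Int)) PySem.Dict.empty id_list)
      (List.flatMap (sendersL (PySem.Set.ofList report))
        (List.filter (fun x => decide (((sendersL (PySem.Set.ofList report) x).length : Int) ≥ k))
          (PySem.Set.ofList id_list)))).keys = PySem.Set.ofList id_list := by
    rw [PySem.Dict.keys_foldl_modify, keys_init]
    apply set_update_of_forall_mem
    intro x hx
    obtain ⟨c, hc, hxc⟩ := List.mem_flatMap.mp hx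
    obtain ⟨ri, hri, rfl⟩ := List.mem_map.mp hxc
    have hrc : recvOf ri = c := by
      have := List.of_mem_filter hri
      exact beq_iff_eq.mp this
    have hcnt : ((sendersL (PySem.Set.ofList report) (recvOf ri)).length : Int) ≥ k := by
      rw [hrc]; exact of_decide_eq_true (List.mem_filter.mp hc).2
    exact (PySem.Set.mem_ofList id_list _).mpr
      ((hf ri (List.mem_of_mem_filter hri)).2.2 hcnt)
  rw [PySem.Dict.values_eq_map_keys _ (by rw [hkeys2]; exact PySem.Set.nodup_ofList id_list) (0 : Int),
    hkeys2]
  unfold canon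
  apply List.map_congr_left
  intro s hs
  rw [PySem.Dict.getD_foldl_modify_add_one, getD_foldl_insert_const,
    if_pos ((PySem.Set.mem_ofList id_list s).mp hs), zero_add]
  congr 1
  show List.countP (· == s) _ = _
  rw [List.countP_flatMap]
  have hc : ∀ c, (List.countP (· == s) ∘ sendersL (PySem.Set.ofList report)) c
      = (PySem.Set.ofList report).countP (fun ri => (sendOf ri == s) && (recvOf ri == c)) := by
    intro c
    simp only [Function.comp, sendersL, List.countP_map, List.countP_filter]
  rw [List.map_congr_left (fun c _ => hc c)]
  exact sum_countP _ _ hnb s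

lemma B_char (id_list report : List String) (k : Int)
    (hpre : Pre_solution id_list report k) :
    solution_alt id_list report k = canon id_list report k := by
  have hf := pre_facts id_list report k hpre
  unfold solution_alt
  simp only []
  have hcrw : ∀ d0 : PySem.Dict String Int,
      (PySem.Set.ofList report).foldl (fun d p =>
        d.modify (((PySem.Str.split? p " ").getD []).getD 1 "") 0 (· + 1)) d0
      = (PySem.Set.ofList report).foldl (fun d ri => d.modify (recvOf ri) 0 (· + 1)) d0 :=
    fun d0 => rfl
  rw [hcrw]
  have hcnt : ∀ r ∈ id_list,
      (List.foldl (fun d ri => d.modify (recvOf ri) 0 (· + 1))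
        (List.foldl (fun d name => d.insert name (0 : Int)) PySem.Dict.empty id_list)
        (PySem.Set.ofList report)).getD r 0
      = ((sendersL (PySem.Set.ofList report) r).length : Int) := by
    intro r hr
    rw [getD_bumpfold, getD_foldl_insert_const, if_pos hr, zero_add]
    congr 1
    rw [count_eq_countP', sendersL, List.length_map, ← List.countP_eq_length_filter]
  rw [List.filter_congr (fun r hr => by rw [hcnt r hr] :
    ∀ r ∈ id_list, decide ((List.foldl (fun d ri => d.modify (recvOf ri) 0 (· + 1))
        (List.foldl (fun d name => d.insert name (0 : Int)) PySem.Dict.empty id_list)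
        (PySem.Set.ofList report)).getD r 0 ≥ k)
      = decide (((sendersL (PySem.Set.ofList report) r).length : Int) ≥ k))]
  have hmem : ∀ x : String,
      ((PySem.Set.ofList (List.filter
          (fun r => decide (((sendersL (PySem.Set.ofList report) r).length : Int) ≥ k)) id_list)).contains x = true)
        ↔ x ∈ bannedL id_list report k := by
    intro x
    unfold PySem.Set.contains
    rw [List.contains_iff_mem, PySem.Set.mem_ofList, List.mem_filter, bannedL, List.mem_filter,
      PySem.Set.mem_ofList]
  rw [PySem.List.foldl_congr_mem (PySem.Set.ofList report) _
    (fun d ri => if recvOf ri ∈ bannedL id_list report k then d.modify (sendOf ri) 0 (· + 1) else d) _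
    (by intro acc ri hri
        show (if (PySem.Set.ofList (List.filter
            (fun r => decide (((sendersL (PySem.Set.ofList report) r).length : Int) ≥ k))
            id_list)).contains (recvOf ri) = true
          then acc.modify (sendOf ri) 0 (· + 1) else acc)
          = (if recvOf ri ∈ bannedL id_list report k
             then acc.modify (sendOf ri) 0 (· + 1) else acc)
        by_cases h : recvOf ri ∈ bannedL id_list report k
        · rw [if_pos ((hmem _).mpr h), if_pos h]
        · rw [if_neg (fun hc => h ((hmem _).mp hc)), if_neg h])]
  rw [PySem.List.foldl_ite_eq_foldl_filter (p := fun ri => recvOf ri ∈ bannedL id_list report k)]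
  have hkeys3 : (List.foldl (fun d ri => d.modify (sendOf ri) 0 fun x => x + 1)
      (List.foldl (fun d name => d.insert name (0 : Int)) PySem.Dict.empty id_list)
      (List.filter (fun ri => decide (recvOf ri ∈ bannedL id_list report k))
        (PySem.Set.ofList report))).keys = PySem.Set.ofList id_list := by
    rw [PySem.Dict.keys_foldl_modify_key (key := sendOf) (f := fun _ _ => fun x => x + 1), keys_init]
    apply set_update_of_forall_mem
    intro x hx
    obtain ⟨ri, hri, rfl⟩ := List.mem_map.mp hx
    have hb : recvOf ri ∈ bannedL id_list report k :=
      of_decide_eq_true (List.mem_filter.mp hri).2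
    have hcnt' : ((sendersL (PySem.Set.ofList report) (recvOf ri)).length : Int) ≥ k := by
      have := (List.mem_filter.mp hb).2
      exact of_decide_eq_true this
    exact (PySem.Set.mem_ofList id_list _).mpr
      ((hf ri (List.mem_of_mem_filter hri)).2.2 hcnt')
  rw [PySem.Dict.values_eq_map_keys _ (by rw [hkeys3]; exact PySem.Set.nodup_ofList id_list) (0 : Int),
    hkeys3]
  unfold canon
  apply List.map_congr_left
  intro s hs
  rw [getD_bumpfold, getD_foldl_insert_const, if_pos ((PySem.Set.mem_ofList id_list s).mp hs), zero_add]
  congr 1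
  rw [count_eq_countP', List.countP_filter]

-- ===== VERDICT (by name: the statement is the Claim_ definition above) =====
theorem solution_spec : Claim_equal_solution := by
  intro id_list report k _hdom hpre
  unfold Spec_solution
  rw [A_char id_list report k hpre, B_char id_list report k hpre]
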